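-- pv_equiv track=rewrite | github.com/govardhansatya/projectmodels | autoresu/backend/app/services/skill_gap_detector.py | _fuzzy_match_skills
-- ===== SOURCE A (Python) =====
-- from typing import Dict, List, Any, Optional, Tuple
--
-- def _fuzzy_match_skills(missing_skills: List[str], resume_skills: List[str]) -> Dict[str, str]:
--     """Perform fuzzy matching to find similar skills."""
--     matches = {}
--
--     # Skill synonyms mapping
--     skill_synonyms = {
--         'js': 'javascript',
--         'ts': 'typescript',
--         'py': 'python',
--         'react.js': 'react',
--         'vue.js': 'vue',
--         'node.js': 'nodejs',
--         'postgresql': 'postgres',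
--         'mysql': 'sql',
--         'ai': 'artificial intelligence',
--         'ml': 'machine learning'
--     }
--
--     for missing_skill in missing_skills:
--         # Check direct synonyms
--         for resume_skill in resume_skills:
--             if (skill_synonyms.get(missing_skill) == resume_skill or
--                 skill_synonyms.get(resume_skill) == missing_skill):
--                 matches[missing_skill] = resume_skill
--                 break
--
--         # Check partial matches
--         if missing_skill not in matches:
--             for resume_skill in resume_skills:
--                 if (missing_skill in resume_skill or resume_skill in missing_skill):
--                     if abs(len(missing_skill) - len(resume_skill)) <= 3:
--                         matches[missing_skill] = resume_skill
--                         break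
--
--     return matches
-- ===== SOURCE B (Python) =====
-- from typing import Dict, List
--
-- _SKILL_SYNONYMS = {
--     'js': 'javascript',
--     'ts': 'typescript',
--     'py': 'python',
--     'react.js': 'react',
--     'vue.js': 'vue',
--     'node.js': 'nodejs',
--     'postgresql': 'postgres',
--     'mysql': 'sql',
--     'ai': 'artificial intelligence',
--     'ml': 'machine learning'
-- }
--
-- def _best_match(missing_skill, resume_skills):
--     """Single pass: return the first synonym match immediately; remember the
--     first partial match as a fallback."""
--     partial = None
--     for resume_skill in resume_skills:
--         if (_SKILL_SYNONYMS.get(missing_skill) == resume_skill or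
--                 _SKILL_SYNONYMS.get(resume_skill) == missing_skill):
--             return resume_skill
--         if (partial is None and (missing_skill in resume_skill or resume_skill in missing_skill)
--                 and abs(len(missing_skill) - len(resume_skill)) <= 3):
--             partial = resume_skill
--     return partial
--
-- def _fuzzy_match_skills(missing_skills: List[str], resume_skills: List[str]) -> Dict[str, str]:
--     matches = {}
--     for missing_skill in missing_skills:
--         best = _best_match(missing_skill, resume_skills)
--         if best is not None:
--             matches[missing_skill] = best
--     return matches
-- ===== Notes on version B (the rewrite author's own statement) =====
-- stated objective: alternative
-- what changed: Replaced A's two sequential inner scans plus a dict-membership re-check with a helper that finds the best candidate in a single pass over resume_skills (early return on a synonym match, first partial match kept as fallback), inserting only when a candidate exists.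
import Mathlib
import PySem

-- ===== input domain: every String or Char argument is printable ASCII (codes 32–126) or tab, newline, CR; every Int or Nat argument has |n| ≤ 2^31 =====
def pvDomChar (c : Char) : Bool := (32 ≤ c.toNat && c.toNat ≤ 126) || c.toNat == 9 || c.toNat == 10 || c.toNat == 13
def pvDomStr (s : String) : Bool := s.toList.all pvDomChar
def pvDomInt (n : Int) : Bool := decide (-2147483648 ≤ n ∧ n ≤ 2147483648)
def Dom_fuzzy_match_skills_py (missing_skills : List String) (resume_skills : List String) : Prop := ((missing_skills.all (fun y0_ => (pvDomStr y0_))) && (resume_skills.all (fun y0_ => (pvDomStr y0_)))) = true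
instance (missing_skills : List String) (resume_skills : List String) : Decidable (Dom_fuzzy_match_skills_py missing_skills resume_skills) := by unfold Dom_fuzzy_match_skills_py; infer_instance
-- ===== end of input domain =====

-- B replaces A's two sequential inner scans (synonyms, then partials, with a dict membership
-- re-check between them) by one helper doing a single pass over resume_skills that returns the
-- first synonym match immediately and keeps the first partial match as a fallback (alternative).

-- shared constant: the skill_synonyms dict literal both Pythons carry
def skillSynonyms : PySem.Dict String String := PySem.Dict.ofList
  [("js", "javascript"), ("ts", "typescript"), ("py", "python"), ("react.js", "react"),
   ("vue.js", "vue"), ("node.js", "nodejs"), ("postgresql", "postgres"), ("mysql", "sql"),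
   ("ai", "artificial intelligence"), ("ml", "machine learning")]

-- ===== PORT A =====
-- inner loop 1: "for resume_skill in resume_skills: if <synonym cond>: matches[m] = r; break"
def aSynLoop (m : String) (rs : List String) (d : PySem.Dict String String) :
    PySem.Dict String String :=
  match rs with
  | [] => d
  | r :: rest =>
      if skillSynonyms.get? m = some r ∨ skillSynonyms.get? r = some m then d.insert m r
      else aSynLoop m rest d

-- inner loop 2: "m in r or r in m", then "abs(len(m) - len(r)) <= 3", insert and break
def aPartLoop (m : String) (rs : List String) (d : PySem.Dict String String) :
    PySem.Dict String String :=
  match rs with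
  | [] => d
  | r :: rest =>
      if PySem.Str.isIn m r || PySem.Str.isIn r m then
        if ((PySem.Str.len m : Int) - (PySem.Str.len r : Int)).natAbs ≤ 3 then d.insert m r
        else aPartLoop m rest d
      else aPartLoop m rest d

def fuzzy_match_skills_py (missing_skills : List String) (resume_skills : List String) :
    List (String × String) :=
  (missing_skills.foldl (fun mtchs m =>
      let mtchs := aSynLoop m resume_skills mtchs
      if mtchs.contains m then mtchs            -- "if missing_skill not in matches" guard
      else aPartLoop m resume_skills mtchs)
    PySem.Dict.empty).items

-- ===== PORT B =====
-- _best_match: one pass; return on a synonym hit, remember the first partial hit as fallback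
def bBest (m : String) (rs : List String) (partial_ : Option String) : Option String :=
  match rs with
  | [] => partial_
  | r :: rest =>
      if skillSynonyms.get? m = some r ∨ skillSynonyms.get? r = some m then some r
      else bBest m rest
        (if partial_.isNone && ((PySem.Str.isIn m r || PySem.Str.isIn r m) &&
            decide (((PySem.Str.len m : Int) - (PySem.Str.len r : Int)).natAbs ≤ 3))
         then some r else partial_)

def fuzzy_match_skills_py_alt (missing_skills : List String) (resume_skills : List String) :
    List (String × String) :=
  (missing_skills.foldl (fun mtchs m =>
      match bBest m resume_skills none with
      | some best => mtchs.insert m best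
      | none => mtchs)
    PySem.Dict.empty).items

-- ===== PRECONDITION & SPEC =====
def Spec_fuzzy_match_skills_py (missing_skills : List String) (resume_skills : List String) (out : List (String × String)) : Prop := out = fuzzy_match_skills_py_alt missing_skills resume_skills
instance (missing_skills : List String) (resume_skills : List String) (out : List (String × String)) : Decidable (Spec_fuzzy_match_skills_py missing_skills resume_skills out) := by unfold Spec_fuzzy_match_skills_py; infer_instance

-- ===== CLAIM (what is proved, stated in full; the proofs are below) =====
def Claim_equal_fuzzy_match_skills_py : Prop := ∀ (missing_skills : List String) (resume_skills : List String), Dom_fuzzy_match_skills_py missing_skills resume_skills → Spec_fuzzy_match_skills_py missing_skills resume_skills (fuzzy_match_skills_py missing_skills resume_skills)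

-- ===== LEMMAS AND PROOFS =====

-- the two candidate conditions as Bool predicates of the missing skill
def synP (m r : String) : Bool :=
  decide (skillSynonyms.get? m = some r ∨ skillSynonyms.get? r = some m)

def partP (m r : String) : Bool :=
  (PySem.Str.isIn m r || PySem.Str.isIn r m) &&
    decide (((PySem.Str.len m : Int) - (PySem.Str.len r : Int)).natAbs ≤ 3)

lemma aSynLoop_eq (m : String) (rs : List String) (d : PySem.Dict String String) :
    aSynLoop m rs d = match rs.find? (synP m) with
      | some r => d.insert m r
      | none => d := by
  induction rs with
  | nil => rfl
  | cons r rest ih =>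
      by_cases h : skillSynonyms.get? m = some r ∨ skillSynonyms.get? r = some m
      · simp [aSynLoop, h, List.find?, synP]
      · simp [aSynLoop, h, List.find?, synP, ih]

lemma aPartLoop_eq (m : String) (rs : List String) (d : PySem.Dict String String) :
    aPartLoop m rs d = match rs.find? (partP m) with
      | some r => d.insert m r
      | none => d := by
  induction rs with
  | nil => rfl
  | cons r rest ih =>
      simp only [aPartLoop, List.find?, partP]
      cases ha : PySem.Chars.isIn m.toList r.toList <;>
        cases hb : PySem.Chars.isIn r.toList m.toList <;>
        by_cases hlen : (((m.length : Int)) - ((r.length : Int))).natAbs ≤ 3 <;>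
        simp [ha, hb, hlen, ih]

lemma bBest_some (m : String) (rs : List String) (p : String) :
    bBest m rs (some p) = match rs.find? (synP m) with
      | some r => some r
      | none => some p := by
  induction rs with
  | nil => rfl
  | cons r rest ih =>
      by_cases h : skillSynonyms.get? m = some r ∨ skillSynonyms.get? r = some m
      · simp [bBest, h, List.find?, synP]
      · simp [bBest, h, List.find?, synP, ih]

lemma bBest_none (m : String) (rs : List String) :
    bBest m rs none = match rs.find? (synP m) with
      | some r => some r
      | none => rs.find? (partP m) := by
  induction rs with
  | nil => rfl
  | cons r rest ih =>
      by_cases h : skillSynonyms.get? m = some r ∨ skillSynonyms.get? r = some m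
      · simp [bBest, h, List.find?, synP]
      · simp only [bBest, List.find?, synP, partP]
        cases ha : PySem.Chars.isIn m.toList r.toList <;>
          cases hb : PySem.Chars.isIn r.toList m.toList <;>
          by_cases hlen : (((m.length : Int)) - ((r.length : Int))).natAbs ≤ 3 <;>
          simp [h, ha, hb, hlen, ih, bBest_some m rest r]

-- re-inserting a key with the value it already holds leaves the dict unchanged
lemma insert_self_of_get? (d : PySem.Dict String String) (k v : String)
    (hnd : d.keys.Nodup) (h : d.get? k = some v) : d.insert k v = d := by
  apply PySem.Dict.ext
  have hc : d.contains k = true := by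
    rw [PySem.Dict.contains_eq_isSome_get?, h]; rfl
  rw [PySem.Dict.items_insert_of_contains d v hc]
  have hall : ∀ p ∈ d.items, (if (p.1 == k) = true then (k, v) else p) = id p := by
    intro p hp
    by_cases hk : p.1 = k
    · have h2 := PySem.Dict.get?_of_mem_items d (k := p.1) (v := p.2) (by simpa using hp) hnd
      rw [hk, h] at h2
      have hv : p.2 = v := by injection h2.symm
      cases p
      simp_all
    · simp [hk]
  rw [List.map_congr_left hall, List.map_id]

-- one outer-loop step of each port
def aStep (rs : List String) (d : PySem.Dict String String) (m : String) :
    PySem.Dict String String :=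
  let d1 := aSynLoop m rs d
  if d1.contains m then d1 else aPartLoop m rs d1

def bStep (rs : List String) (d : PySem.Dict String String) (m : String) :
    PySem.Dict String String :=
  match bBest m rs none with
  | some best => d.insert m best
  | none => d

-- invariant: keys are unique and every stored value is what bBest returns for its key
def PortInv (rs : List String) (d : PySem.Dict String String) : Prop :=
  d.keys.Nodup ∧ ∀ k v, d.get? k = some v → bBest k rs none = some v

lemma step_eq (rs : List String) (d : PySem.Dict String String) (m : String)
    (hI : PortInv rs d) : aStep rs d m = bStep rs d m := by
  obtain ⟨hnd, hget⟩ := hI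
  unfold aStep bStep
  rw [aSynLoop_eq, bBest_none]
  cases hs : rs.find? (synP m) with
  | some r => simp [PySem.Dict.contains_insert_self]
  | none =>
      simp only
      cases hc : d.get? m with
      | some v =>
          have hcc : d.contains m = true := by
            rw [PySem.Dict.contains_eq_isSome_get?, hc]; rfl
          have hb := hget m v hc
          rw [bBest_none, hs] at hb
          simp [hcc, hb, insert_self_of_get? d m v hnd hc]
      | none =>
          have hcc : d.contains m = false := by
            rw [PySem.Dict.contains_eq_isSome_get?, hc]; rfl
          rw [aPartLoop_eq]
          simp [hcc]

lemma step_inv (rs : List String) (d : PySem.Dict String String) (m : String)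
    (hI : PortInv rs d) : PortInv rs (bStep rs d m) := by
  obtain ⟨hnd, hget⟩ := hI
  unfold bStep
  cases hb : bBest m rs none with
  | none => exact ⟨hnd, hget⟩
  | some best =>
      refine ⟨PySem.Dict.nodup_keys_insert d m best hnd, ?_⟩
      intro k v h
      rw [PySem.Dict.get?_insert] at h
      by_cases hk : k = m
      · simp only [hk, reduceIte] at h
        subst hk; rw [hb]; exact congrArg some (by injection h)
      · exact hget k v (by simpa [hk] using h)

lemma fold_eq (rs : List String) (ms : List String) (d : PySem.Dict String String)
    (hI : PortInv rs d) :
    ms.foldl (aStep rs) d = ms.foldl (bStep rs) d := by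
  induction ms generalizing d with
  | nil => rfl
  | cons m rest ih =>
      simp only [List.foldl_cons]
      rw [step_eq rs d m hI]
      exact ih _ (step_inv rs d m hI)

-- ===== VERDICT (by name: the statement is the Claim_ definition above) =====
theorem fuzzy_match_skills_py_spec : Claim_equal_fuzzy_match_skills_py := by
  intro ms rs _
  show fuzzy_match_skills_py ms rs = fuzzy_match_skills_py_alt ms rs
  have hI : PortInv rs PySem.Dict.empty :=
    ⟨PySem.Dict.nodup_keys_empty, fun k v h => by simp [PySem.Dict.get?_empty] at h⟩
  exact congrArg PySem.Dict.items (fold_eq rs ms PySem.Dict.empty hI)
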